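-- pv_equiv track=rewrite | github.com/maoulee/RelationRior | scripts/run_stage_pipeline_test.py | _format_relations_by_domain
-- ===== SOURCE A (Python) =====
-- from typing import Any, Dict, List, Optional, Tuple
--
-- def _format_relations_by_domain(relations: List[str], limit: int = 80, recommended: Optional[set] = None) -> str:
--     """Format relations grouped by domain, one per line. Mark GTE-recommended with ★."""
--     from collections import OrderedDict
--     groups: Dict[str, List[str]] = OrderedDict()
--     for r in relations[:limit]:
--         parts = r.split(".")
--         domain = parts[0] if len(parts) >= 1 else "other"
--         groups.setdefault(domain, []).append(r)
--     lines = []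
--     for domain, rels in groups.items():
--         lines.append(f"[{domain}]")
--         for r in rels:
--             marker = " ★" if recommended and r in recommended else ""
--             lines.append(f"  - {r}{marker}")
--     if recommended:
--         lines.insert(0, "(★ = GTE-recommended by sub-question similarity)")
--     return "\n".join(lines)
-- ===== SOURCE B (Python) =====
-- def _format_relations_by_domain(relations, limit=80, recommended=None):
--     def line(r):
--         mark = " \u2605" if recommended and r in recommended else ""
--         return f"  - {r}{mark}"
--
--     bs = []
--     remaining = relations[:limit]
--     # partition: peel off the first relation's whole domain block, repeat on the rest
--     while remaining:
--         d = remaining[0].split(".")[0]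
--         same = [x for x in remaining if x.split(".")[0] == d]
--         remaining = [x for x in remaining if x.split(".")[0] != d]
--         bs.append("\n".join([f"[{d}]"] + [line(x) for x in same]))
--     if recommended:
--         bs = ["(\u2605 = GTE-recommended by sub-question similarity)"] + bs
--     return "\n".join(bs)
-- ===== Notes on version B (the rewrite author's own statement) =====
-- stated objective: alternative
-- what changed: Replaces A's single OrderedDict grouping pass plus emission loop by a recursive partition: take the first relation's domain, filter out its whole block, emit it as one joined string, and recurse on the remaining relations.
import Mathlib
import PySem

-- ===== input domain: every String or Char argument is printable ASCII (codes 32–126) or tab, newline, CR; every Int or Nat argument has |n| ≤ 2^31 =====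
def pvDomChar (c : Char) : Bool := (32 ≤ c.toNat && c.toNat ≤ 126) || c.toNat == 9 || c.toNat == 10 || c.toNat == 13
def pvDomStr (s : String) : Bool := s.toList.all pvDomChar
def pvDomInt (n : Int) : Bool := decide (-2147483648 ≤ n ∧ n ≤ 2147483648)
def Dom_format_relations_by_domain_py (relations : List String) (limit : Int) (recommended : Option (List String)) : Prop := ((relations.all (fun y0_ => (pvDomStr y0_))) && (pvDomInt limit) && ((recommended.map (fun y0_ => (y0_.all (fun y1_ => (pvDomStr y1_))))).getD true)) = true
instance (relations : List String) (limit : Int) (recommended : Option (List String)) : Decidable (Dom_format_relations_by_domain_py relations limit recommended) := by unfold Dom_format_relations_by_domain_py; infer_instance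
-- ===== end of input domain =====

-- B replaces A's OrderedDict-grouping-then-emission by a recursive partition: peel off the head's
-- domain block (filter equal keys / unequal keys) and recurse on the remainder (alternative decomposition, same output).

-- ===== PORT A =====
-- 'r.split(".")' = Str.split? with sep "." ≠ "" (always 'some', '.getD []' unwraps); the split is never empty,
-- so 'parts[0]' cannot raise: ported as pyGetD with unused default "other" (= the dead 'else' branch's string).
def format_relations_by_domain_py (relations : List String) (limit : Int) (recommended : Option (List String)) : String :=
  let sub := PySem.List.slice relations none (some limit)
  let groups : PySem.Dict String (List String) :=
    sub.foldl (fun g r =>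
      let parts := ((PySem.Str.split? r ".").getD [])
      let domain := if (1 : Int) ≤ (parts.length : Int) then PySem.List.pyGetD parts 0 "other" else "other"
      g.modify domain [] (fun v => v ++ [r])) PySem.Dict.empty
  let lines : List String :=
    groups.items.foldl (fun lines p =>
      p.2.foldl (fun lines r =>
        let marker := match recommended with
          | none => ""
          | some s => if !s.isEmpty && PySem.Set.contains s r then " ★" else ""
        lines ++ ["  - " ++ r ++ marker]) (lines ++ ["[" ++ p.1 ++ "]"])) []
  -- 'lines.insert(0, hdr)' prepends
  let lines := match recommended with
    | none => lines
    | some s => if s.isEmpty then lines else "(★ = GTE-recommended by sub-question similarity)" :: lines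
  PySem.Str.join "\n" lines

-- ===== PORT B =====
-- x.split(".")[0]: the split list is never empty, so '[0]' is its head; ported as headD "" (default unreachable).
def pvAltKey (r : String) : String := ((PySem.Str.split? r ".").getD []).headD ""

def pvAltLine (recommended : Option (List String)) (r : String) : String :=
  let mark := match recommended with
    | none => ""
    | some s => if !s.isEmpty && PySem.Set.contains s r then " ★" else ""
  "  - " ++ r ++ mark

-- Source B's recursive 'blocks': one block string for the head's domain, recurse on the other-domain remainder
def pvAltBlocks (recommended : Option (List String)) : List String → List String
  | [] => []
  | r :: rs =>
    let d := pvAltKey r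
    let same := (r :: rs).filter (fun x => pvAltKey x == d)
    let rest := (r :: rs).filter (fun x => !(pvAltKey x == d))
    PySem.Str.join "\n" (("[" ++ d ++ "]") :: same.map (pvAltLine recommended)) :: pvAltBlocks recommended rest
termination_by rs => rs.length
decreasing_by
  simp only [List.filter_cons, beq_self_eq_true, Bool.not_true, Bool.false_eq_true, if_false]
  exact Nat.lt_succ_of_le (List.length_filter_le _ _)

def format_relations_by_domain_py_alt (relations : List String) (limit : Int) (recommended : Option (List String)) : String :=
  let bs := pvAltBlocks recommended (PySem.List.slice relations none (some limit))
  let bs := match recommended with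
    | none => bs
    | some s => if s.isEmpty then bs else "(★ = GTE-recommended by sub-question similarity)" :: bs
  PySem.Str.join "\n" bs

-- ===== PRECONDITION & SPEC =====
def Spec_format_relations_by_domain_py (relations : List String) (limit : Int) (recommended : Option (List String)) (out : String) : Prop := out = format_relations_by_domain_py_alt relations limit recommended
instance (relations : List String) (limit : Int) (recommended : Option (List String)) (out : String) : Decidable (Spec_format_relations_by_domain_py relations limit recommended out) := by unfold Spec_format_relations_by_domain_py; infer_instance

-- ===== CLAIM (what is proved, stated in full; the proofs are below) =====
def Claim_equal_format_relations_by_domain_py : Prop := ∀ (relations : List String) (limit : Int) (recommended : Option (List String)), Dom_format_relations_by_domain_py relations limit recommended → Spec_format_relations_by_domain_py relations limit recommended (format_relations_by_domain_py relations limit recommended)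

-- ===== LEMMAS AND PROOFS =====

-- the split list is never empty (Python's split always yields at least one piece)
lemma pv_go_ne_nil (sep : List Char) (fuel : Nat) (l cur : List Char) (acc : List (List Char)) :
    PySem.Chars.splitOn.go sep fuel l cur acc ≠ [] := by
  induction fuel generalizing l cur acc with
  | zero => simp [PySem.Chars.splitOn.go]
  | succ n ih =>
    cases l with
    | nil => simp [PySem.Chars.splitOn.go]
    | cons c rest =>
      rw [PySem.Chars.splitOn.go]
      split_ifs <;> exact ih _ _ _

lemma pv_split_ne_nil (r : String) : ((PySem.Str.split? r ".").getD []) ≠ [] := by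
  simp only [PySem.Str.split?, PySem.Chars.split?, PySem.Chars.splitOn]
  simpa using pv_go_ne_nil ".".toList (r.toList.length + 1) r.toList [] []

-- A's guarded domain expression computes the same key as B's
lemma pvKeyA (r : String) :
    (if (1 : Int) ≤ ((((PySem.Str.split? r ".").getD []).length : Int)) then
       PySem.List.pyGetD ((PySem.Str.split? r ".").getD []) 0 "other" else "other") = pvAltKey r := by
  unfold pvAltKey
  cases h : (PySem.Str.split? r ".").getD [] with
  | nil => exact absurd h (pv_split_ne_nil r)
  | cons a t => simp [PySem.List.pyGetD, PySem.List.pyGet?, PySem.List.pyIdx?]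

-- the line-lists of the blocks, as a function of the WHOLE truncated input
def pvBlockLines (f : String → String) (sub : List String) (c : String) : List String :=
  ("[" ++ c ++ "]") :: (sub.filter (fun r => pvAltKey r == c)).map f

-- A's dict-grouped line emission is the flattened block table over first-seen domains
lemma pvA_lines_eq (f : String → String) (sub : List String) :
    ((sub.foldl (fun g r => g.modify (pvAltKey r) [] (fun v => v ++ [r])) PySem.Dict.empty).items.foldl
      (fun lines p => p.2.foldl (fun lines r => lines ++ [f r]) (lines ++ ["[" ++ p.1 ++ "]"])) [])
  = ((PySem.Set.ofList (sub.map pvAltKey)).map (pvBlockLines f sub)).flatten := by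
  have hfold : (sub.foldl (fun g r => g.modify (pvAltKey r) [] (fun v => v ++ [r])) PySem.Dict.empty)
      = ((sub.map (fun r => (pvAltKey r, r))).foldl (fun g p => g.modify p.1 [] (fun v => v ++ [p.2])) PySem.Dict.empty) := by
    rw [List.foldl_map]
  have hnodup : (sub.foldl (fun g r => g.modify (pvAltKey r) [] (fun v => v ++ [r])) PySem.Dict.empty).keys.Nodup :=
    PySem.Dict.nodup_keys_foldl_modify_key sub pvAltKey [] (fun _ r v => v ++ [r]) PySem.Dict.empty (by simp)
  have hkeys : (sub.foldl (fun g r => g.modify (pvAltKey r) [] (fun v => v ++ [r])) PySem.Dict.empty).keys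
      = PySem.Set.ofList (sub.map pvAltKey) := by
    rw [PySem.Dict.keys_foldl_modify_key sub pvAltKey [] (fun _ r v => v ++ [r]) PySem.Dict.empty]
    simp [PySem.Set.update_nil_left]
  have hgetD : ∀ c, (sub.foldl (fun g r => g.modify (pvAltKey r) [] (fun v => v ++ [r])) PySem.Dict.empty).getD c []
      = sub.filter (fun r => pvAltKey r == c) := by
    intro c
    rw [hfold, PySem.Dict.getD_foldl_modify_append]
    simp [List.filter_map, Function.comp_def]
  have hitems : (sub.foldl (fun g r => g.modify (pvAltKey r) [] (fun v => v ++ [r])) PySem.Dict.empty).items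
      = (PySem.Set.ofList (sub.map pvAltKey)).map (fun c => (c, sub.filter (fun r => pvAltKey r == c))) := by
    rw [PySem.Dict.items_eq_map_keys _ hnodup [], hkeys]
    exact List.map_congr_left (fun c _ => by rw [hgetD c])
  rw [hitems]
  simp only [PySem.List.foldl_append_singleton_eq_map]
  rw [show (fun (lines : List String) (p : String × List String) =>
        lines ++ ["[" ++ p.1 ++ "]"] ++ p.2.map f)
      = (fun lines p => lines ++ (("[" ++ p.1 ++ "]") :: p.2.map f)) from by
    funext lines p; simp]
  rw [PySem.List.foldl_append_eq_flatMap]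
  simp only [List.flatMap_def, List.map_map, Function.comp_def, List.nil_append]
  rfl

-- dedup (PySem.Set.ofList) commutes with filter
lemma pv_ofList_filter {α : Type} [BEq α] [LawfulBEq α] (p : α → Bool) (l : List α) :
    PySem.Set.ofList (l.filter p) = (PySem.Set.ofList l).filter p := by
  induction l with
  | nil => simp [PySem.Set.ofList]
  | cons a t ih =>
    by_cases h : p a = true
    · rw [List.filter_cons_of_pos h, PySem.Set.ofList_cons, PySem.Set.ofList_cons, ih,
        List.filter_cons_of_pos h]
      simp only [PySem.Set.discard, List.filter_filter]
      exact congrArg _ (List.filter_congr (fun y _ => Bool.and_comm _ _))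
    · rw [List.filter_cons_of_neg h, PySem.Set.ofList_cons, ih, List.filter_cons_of_neg h]
      simp only [PySem.Set.discard, List.filter_filter]
      exact List.filter_congr (fun y _ => by
        cases hy : y == a with
        | false => simp
        | true => simp [eq_of_beq hy, h])

-- filtering by a key predicate commutes with mapping the key
lemma pv_map_filter_comp (rs : List String) (d : String) :
    (rs.filter (fun x => !(pvAltKey x == d))).map pvAltKey
      = (rs.map pvAltKey).filter (fun y => !(y == d)) := by
  rw [List.filter_map]
  rfl

-- B's recursive partition produces exactly the joined block table over first-seen domains
lemma pvB_blocks_eq (recommended : Option (List String)) (sub : List String) :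
    pvAltBlocks recommended sub
  = ((PySem.Set.ofList (sub.map pvAltKey)).map (pvBlockLines (pvAltLine recommended) sub)).map (PySem.Str.join "\n") := by
  match sub with
  | [] => simp [pvAltBlocks, PySem.Set.ofList]
  | r :: rs =>
    rw [pvAltBlocks]
    have hrest : (r :: rs).filter (fun x => !(pvAltKey x == pvAltKey r))
        = rs.filter (fun x => !(pvAltKey x == pvAltKey r)) := by
      simp
    rw [hrest, pvB_blocks_eq recommended (rs.filter (fun x => !(pvAltKey x == pvAltKey r)))]
    rw [List.map_cons, PySem.Set.ofList_cons, List.map_cons, List.map_cons]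
    congr 1
    have hdisc : PySem.Set.ofList ((rs.filter (fun x => !(pvAltKey x == pvAltKey r))).map pvAltKey)
        = (PySem.Set.ofList (rs.map pvAltKey)).discard (pvAltKey r) := by
      rw [pv_map_filter_comp, pv_ofList_filter]
      rfl
    rw [← hdisc]
    refine congrArg (List.map (PySem.Str.join "\n")) (List.map_congr_left ?_)
    intro c hc
    have hcne : pvAltKey r ≠ c := by
      rcases List.mem_map.mp ((PySem.Set.mem_ofList _ _).mp hc) with ⟨x, hx, hxc⟩
      rcases List.mem_filter.mp hx with ⟨_, hxk⟩
      intro h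
      rw [hxc, h] at hxk
      simp at hxk
    unfold pvBlockLines
    congr 1
    rw [List.filter_cons_of_neg (by simp [hcne]), List.filter_filter]
    refine congrArg (List.map (pvAltLine recommended)) (List.filter_congr (fun x _ => ?_))
    cases hxc : pvAltKey x == c with
    | false => simp
    | true =>
      have hf : (pvAltKey x == pvAltKey r) = false := by
        rw [eq_of_beq hxc]
        exact beq_eq_false_iff_ne.mpr (Ne.symm hcne)
      simp [hf]
termination_by sub.length
decreasing_by
  simp only [List.length_cons]
  exact Nat.lt_succ_of_le (List.length_filter_le _ _)

-- join over an append of nonempty line lists (Chars level)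
lemma pv_join_append (sep : List Char) (xs ys : List (List Char)) (hx : xs ≠ []) (hy : ys ≠ []) :
    PySem.Chars.join sep (xs ++ ys) = PySem.Chars.join sep xs ++ sep ++ PySem.Chars.join sep ys := by
  induction xs with
  | nil => exact absurd rfl hx
  | cons p t ih =>
    cases t with
    | nil =>
      cases ys with
      | nil => exact absurd rfl hy
      | cons q u => rw [List.singleton_append, PySem.Chars.join_cons_cons, PySem.Chars.join_singleton]
    | cons p2 t2 =>
      rw [List.cons_append, PySem.Chars.join_cons_cons]
      rw [show (p2 :: t2) ++ ys = (p2 :: (t2 ++ ys)) from rfl] at *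
      rw [show PySem.Chars.join sep (p :: p2 :: (t2 ++ ys)) = p ++ sep ++ PySem.Chars.join sep (p2 :: (t2 ++ ys)) from PySem.Chars.join_cons_cons sep p p2 (t2 ++ ys)]
      rw [ih (by simp)]
      simp [List.append_assoc]

-- joining the flattened blocks equals joining the per-block joins (each block nonempty), Chars level
lemma pv_join_flatten_chars (sep : List Char) (Ls : List (List (List Char))) (h : ∀ l ∈ Ls, l ≠ []) :
    PySem.Chars.join sep Ls.flatten = PySem.Chars.join sep (Ls.map (PySem.Chars.join sep)) := by
  induction Ls with
  | nil => rfl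
  | cons l T ih =>
    cases T with
    | nil => simp [PySem.Chars.join_singleton]
    | cons L' T' =>
      have hl : l ≠ [] := h l (by simp)
      have hfl : (L' :: T').flatten ≠ [] := by
        have : L' ≠ [] := h L' (by simp)
        cases L' with
        | nil => exact absurd rfl this
        | cons a u => simp
      rw [List.flatten_cons, pv_join_append sep l (L' :: T').flatten hl hfl,
        ih (fun x hx => h x (by simp [hx]))]
      rw [show List.map (PySem.Chars.join sep) (l :: L' :: T')
            = PySem.Chars.join sep l :: PySem.Chars.join sep L' :: List.map (PySem.Chars.join sep) T' from rfl,
        PySem.Chars.join_cons_cons]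
      rfl

-- the same at the Str level
lemma pv_join_flatten (Ls : List (List String)) (h : ∀ l ∈ Ls, l ≠ []) :
    PySem.Str.join "\n" Ls.flatten = PySem.Str.join "\n" (Ls.map (PySem.Str.join "\n")) := by
  unfold PySem.Str.join
  rw [List.map_flatten]
  rw [pv_join_flatten_chars "\n".toList (Ls.map (List.map String.toList))
    (fun x hx => by
      rcases List.mem_map.mp hx with ⟨l, hl, rfl⟩
      simpa using h l hl)]
  congr 1
  simp [List.map_map, Function.comp_def]

-- every block's line list is nonempty (it starts with its header)
lemma pv_blocks_ne_nil (f : String → String) (sub : List String) :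
    ∀ l ∈ (PySem.Set.ofList (sub.map pvAltKey)).map (pvBlockLines f sub), l ≠ [] := by
  intro l hl
  rcases List.mem_map.mp hl with ⟨c, _, rfl⟩
  simp [pvBlockLines]

-- ===== VERDICT (by name: the statement is the Claim_ definition above) =====
theorem format_relations_by_domain_py_spec : Claim_equal_format_relations_by_domain_py := by
  intro relations limit recommended _
  unfold Spec_format_relations_by_domain_py
  simp only [format_relations_by_domain_py, format_relations_by_domain_py_alt, pvKeyA]
  cases recommended with
  | none =>
    refine Eq.trans (congrArg (PySem.Str.join "\n")
      (pvA_lines_eq (pvAltLine none) (PySem.List.slice relations none (some limit)))) ?_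
    rw [pv_join_flatten _ (pv_blocks_ne_nil _ _), ← pvB_blocks_eq]
  | some s =>
    refine Eq.trans (congrArg (fun L => PySem.Str.join "\n"
        (if s.isEmpty then L else "(★ = GTE-recommended by sub-question similarity)" :: L))
      (pvA_lines_eq (pvAltLine (some s)) (PySem.List.slice relations none (some limit)))) ?_
    by_cases hs : s.isEmpty
    · simp only [hs, if_true]
      rw [pv_join_flatten _ (pv_blocks_ne_nil _ _), ← pvB_blocks_eq]
    · simp only [hs, if_false, Bool.false_eq_true]
      have h2 : "(★ = GTE-recommended by sub-question similarity)" ::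
          ((PySem.Set.ofList ((PySem.List.slice relations none (some limit)).map pvAltKey)).map
            (pvBlockLines (pvAltLine (some s)) (PySem.List.slice relations none (some limit)))).flatten
        = (["(★ = GTE-recommended by sub-question similarity)"] ::
          (PySem.Set.ofList ((PySem.List.slice relations none (some limit)).map pvAltKey)).map
            (pvBlockLines (pvAltLine (some s)) (PySem.List.slice relations none (some limit)))).flatten := by
        simp
      rw [h2, pv_join_flatten _ (by
        intro l hl
        rcases List.mem_cons.mp hl with h1 | h3
        · subst h1; simp
        · exact pv_blocks_ne_nil _ _ l h3)]
      rw [List.map_cons, ← pvB_blocks_eq]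
      rw [show PySem.Str.join "\n" ["(★ = GTE-recommended by sub-question similarity)"]
            = "(★ = GTE-recommended by sub-question similarity)" from by
        simp [PySem.Str.join, PySem.Chars.join_singleton]]
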